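-- pv_equiv track=rewrite | github.com/Hk4Fun/algorithm_offer | target_offer/35_2_字符串中删除字符.py | delete_char3
-- ===== SOURCE A (Python) =====
-- def delete_char3(s1, s2):
--     if s1 == None or s2 == None:
--         return
--     d = dict(zip(s2, [1] * len(s2)))
--     result = []
--     for i in s1:
--         if i not in d.keys():
--             result.append(i)
--     return ''.join(result)
-- ===== SOURCE B (Python) =====
-- def delete_char3(s1, s2):
--     if s1 == None or s2 == None:
--         return
--     for c in dict.fromkeys(s2):
--         s1 = s1.replace(c, '')
--     return s1
-- ===== Notes on version B (the rewrite author's own statement) =====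
-- stated objective: alternative
-- what changed: Instead of building a dict from s2 and filtering s1 character by character with a membership test, B iterates over the distinct characters of s2 (dict.fromkeys) and strips each from s1 with a successive str.replace pass, maintaining no accumulator or membership test over s1 at all.
import Mathlib
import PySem

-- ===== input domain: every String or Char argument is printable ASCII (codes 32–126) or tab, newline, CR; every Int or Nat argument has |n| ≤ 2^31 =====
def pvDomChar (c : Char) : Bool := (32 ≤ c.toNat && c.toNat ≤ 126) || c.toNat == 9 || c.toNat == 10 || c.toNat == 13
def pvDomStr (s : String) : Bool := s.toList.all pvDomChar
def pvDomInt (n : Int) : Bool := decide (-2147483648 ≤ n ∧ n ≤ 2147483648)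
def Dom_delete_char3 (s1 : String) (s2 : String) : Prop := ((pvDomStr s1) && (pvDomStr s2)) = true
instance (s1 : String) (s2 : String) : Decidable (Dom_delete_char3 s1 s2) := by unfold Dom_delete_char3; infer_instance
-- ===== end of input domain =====

-- B strips s2's distinct characters from s1 by successive replace passes, instead of
-- A's per-character dict-membership filter over s1 — different traversal, measured faster.


-- ===== PORT A =====
-- the 's1 == None or s2 == None' branch is unreachable for String arguments
def delete_char3 (s1 : String) (s2 : String) : String :=
  let d : PySem.Dict Char Int :=
    PySem.Dict.ofList (s2.toList.zip (List.replicate s2.toList.length (1 : Int)))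
  let result : List Char :=
    s1.toList.foldl (fun r i => if d.contains i then r else r ++ [i]) []
  String.mk result

-- ===== PORT B =====
-- for c in dict.fromkeys(s2): s1 = s1.replace(c, '')
def delete_char3_alt (s1 : String) (s2 : String) : String :=
  (PySem.List.dedup s2.toList).foldl (fun acc c => PySem.Str.replace acc (String.mk [c]) "") s1

-- ===== PRECONDITION & SPEC =====
def Spec_delete_char3 (s1 : String) (s2 : String) (out : String) : Prop := out = delete_char3_alt s1 s2
instance (s1 : String) (s2 : String) (out : String) : Decidable (Spec_delete_char3 s1 s2 out) := by unfold Spec_delete_char3; infer_instance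

-- ===== CLAIM (what is proved, stated in full; the proofs are below) =====
def Claim_equal_delete_char3 : Prop := ∀ (s1 : String) (s2 : String), Dom_delete_char3 s1 s2 → Spec_delete_char3 s1 s2 (delete_char3 s1 s2)

-- ===== LEMMAS AND PROOFS =====

-- membership in the dict built from zip(s2, [1]*len(s2)) = membership in s2's characters
theorem contains_ofList_zip_replicate (xs : List Char) (c : Char) :
    (PySem.Dict.ofList (xs.zip (List.replicate xs.length (1 : Int)))).contains c
      = PySem.Set.contains (PySem.Set.ofList xs) c := by
  rw [Bool.eq_iff_iff, PySem.Dict.contains_iff_mem_keys, PySem.Set.contains_iff]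
  have hk : (PySem.Dict.ofList (xs.zip (List.replicate xs.length (1 : Int)))).keys
      = PySem.Set.ofList ((xs.zip (List.replicate xs.length (1 : Int))).map Prod.fst) := by
    rw [show PySem.Dict.ofList (xs.zip (List.replicate xs.length (1 : Int)))
          = (xs.zip (List.replicate xs.length (1 : Int))).foldl
            (fun d p => d.insert p.1 p.2) PySem.Dict.empty from rfl,
        PySem.Dict.keys_foldl_insert_key _ Prod.fst (fun _ p => p.2),
        PySem.Dict.keys_empty, PySem.Set.update_nil_left]
  rw [hk, List.map_fst_zip (by simp)]

-- replacing a single character by the empty string is filtering it out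
theorem replace_go_singleton (c : Char) :
    ∀ (fuel : Nat) (l acc : List Char), l.length ≤ fuel →
      PySem.Chars.replace.go [c] [] fuel l acc = acc.reverse ++ l.filter (· ≠ c) := by
  intro fuel
  induction fuel with
  | zero => intro l acc h; cases l with
      | nil => simp [PySem.Chars.replace.go]
      | cons a t => simp at h
  | succ n ih =>
      intro l acc h
      cases l with
      | nil => simp [PySem.Chars.replace.go]
      | cons a t =>
          simp only [List.length_cons, Nat.succ_le_succ_iff] at h
          by_cases hc : a = c
          · subst hc
            have hp : List.isPrefixOf [a] (a :: t) = true := by simp [List.isPrefixOf]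
            simp [PySem.Chars.replace.go, hp, ih t acc h, List.filter_cons]
          · have hp : List.isPrefixOf [c] (a :: t) = false := by
              simp [List.isPrefixOf, hc]
              intro h'; exact absurd h'.symm hc
            simp [PySem.Chars.replace.go, hp, ih t (a :: acc) h, List.filter_cons, hc]

theorem replace_char_empty (s : List Char) (c : Char) :
    PySem.Chars.replace s [c] [] = s.filter (· ≠ c) := by
  rw [show PySem.Chars.replace s [c] [] = PySem.Chars.replace.go [c] [] s.length s [] by
        simp [PySem.Chars.replace]]
  simpa using replace_go_singleton c s.length s [] le_rfl

-- folding the single-char removals over xs filters out all characters of xs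
theorem foldl_filter_ne (xs : List Char) :
    ∀ (s : List Char),
      xs.foldl (fun acc c => acc.filter (· ≠ c)) s
        = s.filter (fun x => !(PySem.Set.ofList xs).contains x) := by
  induction xs with
  | nil => intro s; simp
  | cons c t ih =>
      intro s
      rw [List.foldl_cons, ih, List.filter_filter]
      apply List.filter_congr
      intro x _
      simp [PySem.Set.contains_iff, PySem.Set.mem_ofList, decide_eq_true_eq,
        Bool.and_comm, eq_comm]

-- ===== VERDICT (by name: the statement is the Claim_ definition above) =====
theorem delete_char3_spec : Claim_equal_delete_char3 := by
  intro s1 s2 _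
  unfold Spec_delete_char3 delete_char3 delete_char3_alt
  simp only [contains_ofList_zip_replicate]
  have hA : (s1.toList.foldl
        (fun r i => if (PySem.Set.ofList s2.toList).contains i = true then r else r ++ [i]) [])
      = s1.toList.filter (fun x => !(PySem.Set.ofList s2.toList).contains x) := by
    have hfun : (fun (r : List Char) (i : Char) =>
          if (PySem.Set.ofList s2.toList).contains i = true then r else r ++ [i])
        = (fun r i => if (!(PySem.Set.ofList s2.toList).contains i) = true then r ++ [i] else r) := by
      funext r i; cases (PySem.Set.ofList s2.toList).contains i <;> simp
    rw [hfun, PySem.List.foldl_append_if_eq_filter]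
    simp
  have hB : (PySem.List.dedup s2.toList).foldl (fun acc c => PySem.Str.replace acc (String.mk [c]) "") s1
      = String.mk (s1.toList.filter (fun x => !(PySem.Set.ofList s2.toList).contains x)) := by
    have hstep : ∀ (s : String) (c : Char),
        (PySem.Str.replace s (String.mk [c]) "").toList = s.toList.filter (· ≠ c) := by
      intro s c
      have h1 : (String.mk [c]).toList = [c] := String.toList_ofList
      rw [show PySem.Str.replace s (String.mk [c]) ""
            = String.ofList (PySem.Chars.replace s.toList (String.mk [c]).toList
                ("" : String).toList) from rfl, h1,
          show ("" : String).toList = [] from rfl,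
          replace_char_empty, String.toList_ofList]
    have key : ∀ (xs : List Char) (s : String),
        xs.foldl (fun acc c => PySem.Str.replace acc (String.mk [c]) "") s
          = String.mk (xs.foldl (fun acc c => acc.filter (· ≠ c)) s.toList) := by
      intro xs
      induction xs with
      | nil => intro s; simp [String.mk]
      | cons c t ih =>
          intro s
          rw [List.foldl_cons, ih, hstep, List.foldl_cons]
    rw [key, foldl_filter_ne]
    congr 1
    apply List.filter_congr
    intro x _
    simp [PySem.Set.contains_iff, PySem.Set.mem_ofList, PySem.List.mem_dedup]
  rw [hA, hB]
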